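-- pv_equiv track=rewrite | github.com/leiYan1225/MyProject_siat | Python/data_structure/Findjob/TX3.py | func
-- ===== SOURCE A (Python) =====
-- def func(a, b, c):
--     t = a % b
--     temp = t
--     for i in range(b):
--         if temp == c:
--             return "YES"
--         else:
--             temp = (temp+t) % b
--     return "NO"
-- ===== SOURCE B (Python) =====
-- def func(a, b, c):
--     # YES iff some multiple k*t (k>=1, t=a%b) equals c mod b, i.e. iff
--     # 0 <= c < b and gcd(t, b) divides c; gcd via Euclid in O(log b).
--     if b <= 0:
--         return "NO"
--     g, r = b, a % b
--     while r:
--         g, r = r, g % r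
--     return "YES" if 0 <= c < b and c % g == 0 else "NO"
-- ===== Notes on version B (the rewrite author's own statement) =====
-- stated objective: faster
-- what changed: Replaces the O(b) scan over all multiples of a%b mod b with Euclid's gcd: YES iff 0<=c<b and gcd(a%b,b) divides c.
import Mathlib
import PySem

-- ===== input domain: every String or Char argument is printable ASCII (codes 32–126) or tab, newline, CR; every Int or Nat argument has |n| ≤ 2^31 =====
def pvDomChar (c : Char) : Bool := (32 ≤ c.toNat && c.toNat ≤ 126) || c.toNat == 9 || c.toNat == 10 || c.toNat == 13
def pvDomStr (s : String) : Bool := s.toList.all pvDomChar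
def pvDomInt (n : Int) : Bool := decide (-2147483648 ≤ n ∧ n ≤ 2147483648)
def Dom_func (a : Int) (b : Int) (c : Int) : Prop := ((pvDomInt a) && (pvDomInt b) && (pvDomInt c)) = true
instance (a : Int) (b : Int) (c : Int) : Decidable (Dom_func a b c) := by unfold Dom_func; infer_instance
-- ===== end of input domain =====

-- B: Euclid's gcd closed form (YES iff 0 ≤ c < b and gcd(a%b,b) ∣ c) instead of A's O(b) scan of multiples.


-- ===== PORT A =====
-- the 'for i in range(b)' loop: n counts remaining iterations, temp is the running value
def funcLoopA (t b c : Int) : Int → Nat → String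
  | _temp, 0 => "NO"
  | temp, Nat.succ n =>
    if temp = c then "YES" else funcLoopA t b c (PySem.Int.mod (temp + t) b) n

def func (a : Int) (b : Int) (c : Int) : String :=
  let t := PySem.Int.mod a b
  funcLoopA t b c t b.toNat

-- ===== PORT B =====
-- the 'while r: g, r = r, g % r' loop of Source B
def euclidB (g r : Int) : Int :=
  if h : r ≠ 0 then euclidB r (PySem.Int.mod g r) else g
termination_by r.natAbs
decreasing_by
  rcases lt_or_gt_of_ne h with hr | hr
  · have := PySem.Int.mod_neg_bounds (a := g) hr
    omega
  · have h1 := PySem.Int.mod_nonneg (a := g) hr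
    have h2 := PySem.Int.mod_lt (a := g) hr
    omega

def func_alt (a : Int) (b : Int) (c : Int) : String :=
  if b ≤ 0 then "NO"
  else
    let g := euclidB b (PySem.Int.mod a b)
    if 0 ≤ c ∧ c < b ∧ PySem.Int.mod c g = 0 then "YES" else "NO"

-- ===== PRECONDITION & SPEC =====
-- Pre_ excludes only b = 0, where Python's 'a % b' raises ZeroDivisionError.
def Pre_func (a : Int) (b : Int) (c : Int) : Prop := b ≠ 0
instance (a : Int) (b : Int) (c : Int) : Decidable (Pre_func a b c) := by unfold Pre_func; infer_instance
def pvWitness_func : Int × Int × Int := (7, 3, 1)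

def Spec_func (a : Int) (b : Int) (c : Int) (out : String) : Prop := out = func_alt a b c
instance (a : Int) (b : Int) (c : Int) (out : String) : Decidable (Spec_func a b c out) := by unfold Spec_func; infer_instance

-- ===== CLAIM (what is proved, stated in full; the proofs are below) =====
def Claim_equal_func : Prop := ∀ (a : Int) (b : Int) (c : Int), Dom_func a b c → Pre_func a b c → Spec_func a b c (func a b c)

-- ===== LEMMAS AND PROOFS =====

-- the loop only ever returns "YES" or "NO"
theorem funcLoopA_cases (t b c : Int) (temp : Int) (n : Nat) :
    funcLoopA t b c temp n = "YES" ∨ funcLoopA t b c temp n = "NO" := by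
  induction n generalizing temp with
  | zero => right; rfl
  | succ n ih =>
    by_cases h : temp = c
    · left; simp [funcLoopA, h]
    · simpa [funcLoopA, h] using ih _

-- loop characterisation: with temp = (m*t) % b, YES iff some later multiple hits c
theorem funcLoopA_yes_iff (t b c : Int) (hb : 0 < b) (m : Int) (n : Nat) :
    funcLoopA t b c ((m * t) % b) n = "YES" ↔ ∃ j : Nat, j < n ∧ ((m + j) * t) % b = c := by
  induction n generalizing m with
  | zero => simp [funcLoopA]
  | succ n ih =>
    by_cases h : (m * t) % b = c
    · constructor
      · intro _
        exact ⟨0, Nat.succ_pos n, by simpa using h⟩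
      · intro _; simp [funcLoopA, h]
    · have hstep : PySem.Int.mod ((m * t) % b + t) b = ((m + 1) * t) % b := by
        rw [PySem.Int.mod_eq_emod_of_pos hb, Int.emod_add_emod]
        ring_nf
      rw [funcLoopA, if_neg h, hstep, ih (m + 1)]
      constructor
      · rintro ⟨j, hj, hjc⟩
        exact ⟨j + 1, by omega, by rw [← hjc]; push_cast; ring_nf⟩
      · rintro ⟨j, hj, hjc⟩
        match j with
        | 0 => exact absurd (by simpa using hjc) h
        | Nat.succ j => exact ⟨j, by omega, by rw [← hjc]; push_cast; ring_nf⟩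

-- euclidB computes the gcd on nonnegative inputs
theorem euclidB_eq_gcd (r g : Int) (hr : 0 ≤ r) (hg : 0 ≤ g) :
    euclidB g r = (Int.gcd g r : Int) := by
  by_cases h : r = 0
  · subst h
    rw [euclidB]
    simp [Int.natAbs_of_nonneg hg]
  · have hrpos : 0 < r := lt_of_le_of_ne hr (Ne.symm h)
    have h1 := PySem.Int.mod_nonneg (a := g) hrpos
    have h2 := PySem.Int.mod_lt (a := g) hrpos
    rw [euclidB, dif_pos h, euclidB_eq_gcd (PySem.Int.mod g r) r h1 hr,
      PySem.Int.mod_eq_emod_of_pos hrpos]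
    rw [Int.gcd_comm r, Int.gcd_emod]
termination_by r.natAbs
decreasing_by
  have h1 := PySem.Int.mod_nonneg (a := g) (by omega : (0:Int) < r)
  have h2 := PySem.Int.mod_lt (a := g) (by omega : (0:Int) < r)
  omega

-- number theory core: some positive multiple of t hits c mod b  iff  0 ≤ c < b and gcd t b ∣ c
theorem multiples_iff (t b c : Int) (hb : 0 < b) :
    (∃ j : Nat, j < b.toNat ∧ ((1 + (j:Int)) * t) % b = c) ↔
      (0 ≤ c ∧ c < b ∧ (Int.gcd t b : Int) ∣ c) := by
  constructor
  · rintro ⟨j, hj, rfl⟩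
    refine ⟨Int.emod_nonneg _ (by omega), Int.emod_lt_of_pos _ hb, ?_⟩
    have ht : (Int.gcd t b : Int) ∣ t := Int.gcd_dvd_left _ _
    have hbd : (Int.gcd t b : Int) ∣ b := Int.gcd_dvd_right _ _
    rw [Int.emod_def]
    exact dvd_sub (Dvd.dvd.mul_left ht _) (Dvd.dvd.mul_right hbd _)
  · rintro ⟨hc0, hcb, e, hce⟩
    have hbez := Int.gcd_eq_gcd_ab t b
    have hmod : ((Int.gcdA t b * e) * t) % b = c := by
      have h : (Int.gcdA t b * e) * t = c + b * (-(Int.gcdB t b * e)) := by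
        rw [hce, hbez]; ring
      rw [h, Int.add_mul_emod_self_left, Int.emod_eq_of_lt hc0 hcb]
    set k0 : Int := Int.gcdA t b * e with hk0def
    set k : Int := (k0 - 1) % b + 1 with hkdef
    have h1 : 0 ≤ (k0 - 1) % b := Int.emod_nonneg _ (by omega)
    have h2 : (k0 - 1) % b < b := Int.emod_lt_of_pos _ hb
    have hkmod : (k * t) % b = c := by
      have hkk0 : k = k0 + b * (-((k0 - 1) / b)) := by
        rw [hkdef, Int.emod_def]; ring
      have h3 : (k0 + b * (-((k0 - 1) / b))) * t
          = k0 * t + b * ((-((k0 - 1) / b)) * t) := by ring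
      rw [hkk0, h3, Int.add_mul_emod_self_left, hmod]
    refine ⟨(k - 1).toNat, by omega, ?_⟩
    have h4 : (1 : Int) + ((k - 1).toNat : Int) = k := by omega
    rw [h4, hkmod]

-- ===== VERDICT (by name: the statement is the Claim_ definition above) =====
theorem func_spec : Claim_equal_func := by
  intro a b c _ hb
  unfold Spec_func func func_alt
  rcases lt_or_gt_of_ne hb with hneg | hpos
  · have h0 : b.toNat = 0 := by omega
    simp [h0, funcLoopA, le_of_lt hneg]
  · rw [if_neg (by omega : ¬ b ≤ 0)]
    have hmod : PySem.Int.mod a b = a % b := PySem.Int.mod_eq_emod_of_pos hpos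
    have ht0 : 0 ≤ a % b := Int.emod_nonneg _ (by omega)
    have htb : a % b < b := Int.emod_lt_of_pos _ hpos
    have hinit : a % b = ((1 : Int) * (a % b)) % b := by
      rw [one_mul, Int.emod_eq_of_lt ht0 htb]
    have hiff := funcLoopA_yes_iff (a % b) b c hpos 1 b.toNat
    rw [← hinit, multiples_iff _ _ _ hpos] at hiff
    have hg : euclidB b (PySem.Int.mod a b) = (Int.gcd (a % b) b : Int) := by
      rw [hmod, euclidB_eq_gcd _ _ ht0 (le_of_lt hpos), Int.gcd_comm]
    rw [hmod] at hg
    show funcLoopA (PySem.Int.mod a b) b c (PySem.Int.mod a b) b.toNat =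
      if 0 ≤ c ∧ c < b ∧ PySem.Int.mod c (euclidB b (PySem.Int.mod a b)) = 0 then "YES" else "NO"
    rw [hmod, hg]
    by_cases hcond : 0 ≤ c ∧ c < b ∧ (Int.gcd (a % b) b : Int) ∣ c
    · rw [hiff.mpr hcond,
        if_pos ⟨hcond.1, hcond.2.1, (PySem.Int.mod_eq_zero_iff_dvd _ _).mpr hcond.2.2⟩]
    · have hno : funcLoopA (a % b) b c (a % b) b.toNat = "NO" := by
        rcases funcLoopA_cases (a % b) b c (a % b) b.toNat with h | h
        · exact absurd (hiff.mp h) hcond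
        · exact h
      rw [hno, if_neg (by
        rintro ⟨u1, u2, u3⟩
        exact hcond ⟨u1, u2, (PySem.Int.mod_eq_zero_iff_dvd _ _).mp u3⟩)]
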